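-- pv_equiv track=rewrite | github.com/wenjixiao/happy | stupid/src/client/board.py | selectPoints
-- ===== SOURCE A (Python) =====
-- def selectPoints(points):
-- 	origin = points[0]
--
-- 	my = []
-- 	other = []
-- 	for i,t in enumerate(points):
-- 		if t[2]:
-- 			if t[3] != origin[3]:
-- 				other.append(i)
-- 			else:
-- 				my.append(i)
--
-- 	if len(other) == 0:
-- 		return points
-- 	else:
-- 		otherFirst = other[0]
-- 		my1 = list(filter(lambda i: i < otherFirst,my))
-- 		lastIndex = my1[-1]
-- 		return points[:lastIndex+1]
-- ===== SOURCE B (Python) =====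
-- def selectPoints(points):
-- 	lastMy = -1
-- 	for i, t in enumerate(points):
-- 		if t[2]:
-- 			if t[3] != points[0][3]:
-- 				return points[:lastMy+1]
-- 			lastMy = i
-- 	return points
-- ===== Notes on version B (the rewrite author's own statement) =====
-- stated objective: simpler
-- what changed: Single early-stopping scan tracking only the last own-stone index, replacing A's two intermediate index lists, its separate filter pass and the slice bookkeeping.
import Mathlib
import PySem

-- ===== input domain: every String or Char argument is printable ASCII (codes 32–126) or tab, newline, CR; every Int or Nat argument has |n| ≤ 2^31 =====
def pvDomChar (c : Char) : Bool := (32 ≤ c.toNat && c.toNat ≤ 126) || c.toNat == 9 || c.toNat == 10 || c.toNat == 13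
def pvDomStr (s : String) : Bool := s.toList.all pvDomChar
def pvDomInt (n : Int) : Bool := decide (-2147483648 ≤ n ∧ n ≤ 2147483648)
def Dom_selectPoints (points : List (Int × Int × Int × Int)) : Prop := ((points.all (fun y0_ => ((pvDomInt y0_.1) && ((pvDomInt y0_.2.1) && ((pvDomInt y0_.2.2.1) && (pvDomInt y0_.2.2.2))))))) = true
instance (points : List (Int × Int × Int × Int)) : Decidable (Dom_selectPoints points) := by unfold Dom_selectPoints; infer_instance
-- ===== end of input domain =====

-- B replaces A's two index lists + filter pass by one early-stopping scan that only
-- remembers the last own-colour index (objective: simpler; equivalence on the return value).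

-- ===== PORT A =====
-- loop body of A's for-loop: append i to `other` or `my` when t[2] is truthy
def pvStepA (o4 : Int) (acc : List Int × List Int) (it : Int × (Int × Int × Int × Int)) :
    List Int × List Int :=
  if it.2.2.2.1 ≠ 0 then
    if it.2.2.2.2 ≠ o4 then (acc.1, acc.2 ++ [it.1]) else (acc.1 ++ [it.1], acc.2)
  else acc

-- the code after A's loop: `if len(other) == 0 … else … my1[-1] … points[:lastIndex+1]`
-- (the `none` branch is Python's IndexError on my1[-1], excluded by Pre_)
def pvFinishA (points : List (Int × Int × Int × Int)) (st : List Int × List Int) :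
    List (Int × Int × Int × Int) :=
  if st.2.length = 0 then points
  else
    let otherFirst := st.2.head!
    let my1 := st.1.filter (fun j => j < otherFirst)
    match my1.getLast? with
    | none => []
    | some lastIndex => PySem.List.slice points none (some (lastIndex + 1))

def selectPoints (points : List (Int × Int × Int × Int)) : List (Int × Int × Int × Int) :=
  match PySem.List.pyGet? points 0 with
  | none => []   -- `origin = points[0]` raises on []; excluded by Pre_
  | some origin =>
      pvFinishA points ((PySem.List.enumerate points).foldl (pvStepA origin.2.2.2) ([], []))

-- ===== PORT B =====
-- B's for-loop: one scan, carrying the index of the last own-colour stone (-1 = none yet)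
def pvLoopB (points : List (Int × Int × Int × Int)) (o4 : Int) :
    List (Int × Int × Int × Int) → Int → Int → List (Int × Int × Int × Int)
  | [], _, _ => points
  | t :: rs, i, lastMy =>
      if t.2.2.1 ≠ 0 then
        if t.2.2.2 ≠ o4 then PySem.List.slice points none (some (lastMy + 1))
        else pvLoopB points o4 rs (i + 1) i
      else pvLoopB points o4 rs (i + 1) lastMy

def selectPoints_alt (points : List (Int × Int × Int × Int)) : List (Int × Int × Int × Int) :=
  -- points[0][3] is only evaluated by Python B inside the loop (so points is nonempty there);
  -- the getD default is never compared
  pvLoopB points (((PySem.List.pyGet? points 0).getD (0, 0, 0, 0)).2.2.2) points 0 (-1)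

-- ===== PRECONDITION & SPEC =====
-- Pre_ excludes exactly the inputs where Python A raises IndexError: the empty list
-- (points[0]) and lists where some other-colour stone has no own-colour stone before it (my1[-1]).
def Pre_selectPoints (points : List (Int × Int × Int × Int)) : Prop :=
  points ≠ [] ∧
    ∀ k < points.length,
      (points[k]!.2.2.1 ≠ 0 ∧ points[k]!.2.2.2 ≠ points.headI.2.2.2) →
      ∃ j < k, points[j]!.2.2.1 ≠ 0 ∧ points[j]!.2.2.2 = points.headI.2.2.2
instance (points : List (Int × Int × Int × Int)) : Decidable (Pre_selectPoints points) := by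
  unfold Pre_selectPoints; infer_instance

def pvWitness_selectPoints : (List (Int × Int × Int × Int)) := [(0, 0, 1, 5)]

def Spec_selectPoints (points : List (Int × Int × Int × Int)) (out : List (Int × Int × Int × Int)) : Prop := out = selectPoints_alt points
instance (points : List (Int × Int × Int × Int)) (out : List (Int × Int × Int × Int)) : Decidable (Spec_selectPoints points out) := by unfold Spec_selectPoints; infer_instance

-- ===== CLAIM (what is proved, stated in full; the proofs are below) =====
def Claim_equal_selectPoints : Prop := ∀ (points : List (Int × Int × Int × Int)), Dom_selectPoints points → Pre_selectPoints points → Spec_selectPoints points (selectPoints points)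

-- ===== LEMMAS AND PROOFS =====

-- A's loop only ever appends: starting from (m, ot) it ends in (m ++ ma, ot ++ oa),
-- and every newly collected index is ≥ the start position.
lemma pvFold_state (o4 : Int) :
    ∀ (rs : List (Int × Int × Int × Int)) (i : Int) (m ot : List Int),
      ∃ ma oa,
        (PySem.List.enumerate rs i).foldl (pvStepA o4) (m, ot) = (m ++ ma, ot ++ oa) ∧
        ∀ x ∈ ma, i ≤ x := by
  intro rs
  induction rs with
  | nil => intro i m ot; exact ⟨[], [], by simp [PySem.List.enumerate], by simp⟩
  | cons t rs ih =>
      intro i m ot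
      rw [PySem.List.enumerate_cons, List.foldl_cons]
      by_cases hf : t.2.2.1 ≠ 0
      · by_cases ho : t.2.2.2 ≠ o4
        · obtain ⟨ma, oa, heq, hb⟩ := ih (i + 1) m (ot ++ [i])
          refine ⟨ma, [i] ++ oa, ?_, fun x hx => by have := hb x hx; omega⟩
          simpa [pvStepA, hf, ho, List.append_assoc] using heq
        · obtain ⟨ma, oa, heq, hb⟩ := ih (i + 1) (m ++ [i]) ot
          refine ⟨[i] ++ ma, oa, ?_, ?_⟩
          · simpa [pvStepA, hf, ho, List.append_assoc] using heq
          · intro x hx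
            rcases List.mem_append.mp hx with hx | hx
            · simp at hx; omega
            · have := hb x hx; omega
      · obtain ⟨ma, oa, heq, hb⟩ := ih (i + 1) m ot
        refine ⟨ma, oa, ?_, fun x hx => by have := hb x hx; omega⟩
        simpa [pvStepA, hf] using heq

-- main invariant: finishing A's loop from state (m, []) agrees with B's scan carrying
-- lastMy = last element of m (or -1), provided every index in m is < the current position.
lemma pvMain (o4 : Int) (points : List (Int × Int × Int × Int)) :
    ∀ (rest : List (Int × Int × Int × Int)) (i : Int) (m : List Int),
      (∀ x ∈ m, x < i) →
      pvFinishA points ((PySem.List.enumerate rest i).foldl (pvStepA o4) (m, [])) =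
        pvLoopB points o4 rest i (m.getLast?.getD (-1)) := by
  intro rest
  induction rest with
  | nil => intro i m _; simp [PySem.List.enumerate, pvFinishA, pvLoopB]
  | cons t rs ih =>
      intro i m hm
      rw [PySem.List.enumerate_cons, List.foldl_cons]
      by_cases hf : t.2.2.1 = 0
      · -- no stone here: both sides skip
        have hstep : pvStepA o4 (m, []) (i, t) = (m, []) := by simp [pvStepA, hf]
        rw [hstep, ih (i + 1) m (fun x hx => by have := hm x hx; omega)]
        simp [pvLoopB, hf]
      · by_cases ho : t.2.2.2 = o4
        · -- own-colour stone: A appends i to my, B sets lastMy := i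
          have hstep : pvStepA o4 (m, []) (i, t) = (m ++ [i], []) := by
            simp [pvStepA, hf, ho]
          rw [hstep, ih (i + 1) (m ++ [i])
            (fun x hx => by
              rcases List.mem_append.mp hx with hx | hx
              · have := hm x hx; omega
              · simp at hx; omega)]
          simp [pvLoopB, hf, ho]
        · -- first other-colour stone: both sides stop here
          obtain ⟨ma, oa, heq, hb⟩ := pvFold_state o4 rs (i + 1) m [i]
          have hstep : pvStepA o4 (m, []) (i, t) = (m, [i]) := by simp [pvStepA, hf, ho]
          rw [hstep, heq]
          have hR : pvLoopB points o4 (t :: rs) i (m.getLast?.getD (-1)) =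
              PySem.List.slice points none (some (m.getLast?.getD (-1) + 1)) := by
            simp [pvLoopB, hf, ho]
          rw [hR]
          have hfilter : (m ++ ma).filter (fun j => decide (j < i)) = m := by
            rw [List.filter_append]
            have h1 : m.filter (fun j => decide (j < i)) = m :=
              List.filter_eq_self.mpr (fun x hx => by simp [hm x hx])
            have h2 : ma.filter (fun j => decide (j < i)) = [] :=
              List.filter_eq_nil_iff.mpr (fun x hx => by have := hb x hx; simp; omega)
            rw [h1, h2, List.append_nil]
          -- pvFinishA on (m ++ ma, [i] ++ oa) reduces definitionally to its else-branch
          show (match (List.filter (fun j => decide (j < i)) (m ++ ma)).getLast? with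
              | none => ([] : List (Int × Int × Int × Int))
              | some lastIndex => PySem.List.slice points none (some (lastIndex + 1))) = _
          rw [hfilter]
          cases hml : m.getLast? with
          | none =>
              show ([] : List (Int × Int × Int × Int)) =
                PySem.List.slice points none (some ((Option.none : Option Int).getD (-1) + 1))
              rw [show ((Option.none : Option Int).getD (-1) + 1) = 0 by simp]
              rw [PySem.List.slice_to points (by norm_num : (0 : Int) ≤ 0)]
              simp
          | some l =>
              show PySem.List.slice points none (some (l + 1)) =
                PySem.List.slice points none (some ((some l).getD (-1) + 1))
              simp

-- ===== VERDICT (by name: the statement is the Claim_ definition above) =====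
theorem selectPoints_spec : Claim_equal_selectPoints := by
  intro points _ hpre
  unfold Spec_selectPoints
  obtain ⟨hne, -⟩ := hpre
  obtain ⟨h, tl, rfl⟩ := List.exists_cons_of_ne_nil hne
  have hget : PySem.List.pyGet? (h :: tl) (0 : Int) = some h := by
    simp [PySem.List.pyGet?, PySem.List.pyIdx?]
  unfold selectPoints selectPoints_alt
  rw [hget]
  simpa using pvMain h.2.2.2 (h :: tl) (h :: tl) 0 [] (by simp)
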